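-- pv_equiv track=rewrite | github.com/posl/comment_recommendation | script/mod_gen/2_time/en/238_B/6.py | findMaxAngle
-- ===== SOURCE A (Python) =====
-- def findMaxAngle(N, A):
--     angles = []
--     for i in range(N):
--         angles.append(sum(A[:i+1])%360)
--     angles.sort()
--     maxAngle = 0
--     for i in range(N):
--         maxAngle = max(maxAngle, angles[i-1]-angles[i])
--     return 360-maxAngle
-- ===== SOURCE B (Python) =====
-- def findMaxAngle(N, A):
--     if N <= 0:
--         return 360
--     s = 0
--     lo, hi = 360, -1
--     for x in A[:N]:
--         s += x
--         v = s % 360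
--         if v < lo:
--             lo = v
--         if v > hi:
--             hi = v
--     if hi < 0:
--         return 360
--     return 360 - (hi - lo)
-- ===== Notes on version B (the rewrite author's own statement) =====
-- stated objective: faster
-- what changed: Replaces the quadratic re-summation of every prefix plus a sort with a single running-prefix-sum pass that tracks only the min and max of the values mod 360.
import Mathlib
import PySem

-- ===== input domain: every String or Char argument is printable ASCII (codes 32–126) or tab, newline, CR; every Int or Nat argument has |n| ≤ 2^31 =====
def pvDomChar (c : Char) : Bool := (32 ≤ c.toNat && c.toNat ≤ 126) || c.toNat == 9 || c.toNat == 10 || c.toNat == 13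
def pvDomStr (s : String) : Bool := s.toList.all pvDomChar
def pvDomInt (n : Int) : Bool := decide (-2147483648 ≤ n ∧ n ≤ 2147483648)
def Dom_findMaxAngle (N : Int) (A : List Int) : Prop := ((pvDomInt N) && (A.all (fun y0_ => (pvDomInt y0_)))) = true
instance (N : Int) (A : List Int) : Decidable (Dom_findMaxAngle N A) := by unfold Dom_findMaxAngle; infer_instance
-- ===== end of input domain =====

-- B replaces A's quadratic prefix re-summation + sort by one running-prefix-sum pass tracking min/max of the values mod 360 (objective: faster).

-- ===== PORT A =====
def findMaxAngle (N : Int) (A : List Int) : Int :=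
  -- angles = []; for i in range(N): angles.append(sum(A[:i+1]) % 360)
  let angles : List Int := (PySem.List.pyRange 0 N 1).foldl
    (fun acc i => acc ++ [PySem.Int.mod (PySem.List.slice A none (some (i + 1))).sum 360]) []
  -- angles.sort()
  let angles := PySem.List.sorted angles (fun x => x) false
  -- maxAngle = 0; for i in range(N): maxAngle = max(maxAngle, angles[i-1] - angles[i])
  -- (the index i-1 is -1 at i = 0 and otherwise in range, so angles[i] never raises; pyGetD's default is unreachable)
  let maxAngle : Int := (PySem.List.pyRange 0 N 1).foldl
    (fun m i => max m (PySem.List.pyGetD angles (i - 1) 0 - PySem.List.pyGetD angles i 0)) 0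
  360 - maxAngle

-- ===== PORT B =====
def findMaxAngle_alt (N : Int) (A : List Int) : Int :=
  if N ≤ 0 then 360
  else
    -- s = 0; lo, hi = 360, -1; for x in A[:N]: s += x; v = s % 360; update lo, hi
    let st : Int × Int × Int := (PySem.List.slice A none (some N)).foldl
      (fun (st : Int × Int × Int) x =>
        let s := st.1 + x
        let v := PySem.Int.mod s 360
        ((s, if v < st.2.1 then v else st.2.1, if st.2.2 < v then v else st.2.2) : Int × Int × Int))
      ((0, 360, -1) : Int × Int × Int)
    if st.2.2 < 0 then 360 else 360 - (st.2.2 - st.2.1)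

-- ===== PRECONDITION & SPEC =====
def Spec_findMaxAngle (N : Int) (A : List Int) (out : Int) : Prop := out = findMaxAngle_alt N A
instance (N : Int) (A : List Int) (out : Int) : Decidable (Spec_findMaxAngle N A out) := by unfold Spec_findMaxAngle; infer_instance

-- ===== CLAIM (what is proved, stated in full; the proofs are below) =====
def Claim_equal_findMaxAngle : Prop := ∀ (N : Int) (A : List Int), Dom_findMaxAngle N A → Spec_findMaxAngle N A (findMaxAngle N A)

-- ===== LEMMAS AND PROOFS =====

-- the chain of running prefix sums mod 360, starting from accumulated sum s
def pvMods (s : Int) : List Int → List Int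
  | [] => []
  | x :: t => PySem.Int.mod (s + x) 360 :: pvMods (s + x) t

theorem pvMods_bounds (s : Int) (l : List Int) : ∀ v ∈ pvMods s l, 0 ≤ v ∧ v < 360 := by
  induction l generalizing s with
  | nil => simp [pvMods]
  | cons x t ih =>
    intro v hv
    rcases (List.mem_cons).1 hv with h | h
    · subst h
      exact ⟨PySem.Int.mod_nonneg _ (by omega), PySem.Int.mod_lt _ (by omega)⟩
    · exact ih (s + x) v h

theorem pvMods_sum_mem (s : Int) (l : List Int) (h : l ≠ []) :
    PySem.Int.mod (s + l.sum) 360 ∈ pvMods s l := by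
  induction l generalizing s with
  | nil => exact absurd rfl h
  | cons x t ih =>
    rcases Decidable.em (t = []) with ht | ht
    · subst ht; simp [pvMods]
    · have := ih (s + x) ht
      simp only [pvMods, List.sum_cons, List.mem_cons]
      right
      have : s + (x + t.sum) = s + x + t.sum := by ring
      rw [this]
      exact ih (s + x) ht

theorem pvMods_eq_map (s : Int) (l : List Int) :
    pvMods s l = (List.range l.length).map (fun k => PySem.Int.mod (s + (l.take (k + 1)).sum) 360) := by
  induction l generalizing s with
  | nil => simp [pvMods]
  | cons x t ih =>
    simp only [pvMods, List.length_cons, List.range_succ_eq_map, List.map_cons, List.map_map]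
    congr 1
    · simp
    · rw [ih (s + x)]
      apply List.map_congr_left
      intro k _
      simp only [Function.comp]
      congr 1
      simp [List.sum_cons]
      ring

-- B's loop computes the running sum together with fold-min / fold-max of the mod values
theorem pvFoldB (l : List Int) (s lo hi : Int) :
    l.foldl (fun (st : Int × Int × Int) x =>
        let s := st.1 + x
        let v := PySem.Int.mod s 360
        ((s, if v < st.2.1 then v else st.2.1, if st.2.2 < v then v else st.2.2) : Int × Int × Int))
      (s, lo, hi)
    = (s + l.sum, (pvMods s l).foldl min lo, (pvMods s l).foldl max hi) := by
  induction l generalizing s lo hi with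
  | nil => simp [pvMods]
  | cons x t ih =>
    simp only [List.foldl_cons, pvMods, List.sum_cons]
    rw [ih (s + x)]
    simp only [Prod.mk.injEq]
    refine ⟨by ring, ?_, ?_⟩
    · congr 1
      rcases lt_or_ge (PySem.Int.mod (s + x) 360) lo with h | h
      · rw [if_pos h, min_eq_right (le_of_lt h)]
      · rw [if_neg (not_lt.2 h), min_eq_left h]
    · congr 1
      rcases lt_or_ge hi (PySem.Int.mod (s + x) 360) with h | h
      · rw [if_pos h, max_eq_right (le_of_lt h)]
      · rw [if_neg (not_lt.2 h), max_eq_left h]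

theorem pvFoldMaxNonpos (f : Int → Int) : ∀ (l : List Int) (m : Int),
    (∀ i ∈ l, f i ≤ 0) → 0 ≤ m → l.foldl (fun m i => max m (f i)) m = m := by
  intro l
  induction l with
  | nil => intro m _ _; rfl
  | cons x t ih =>
    intro m h hm
    simp only [List.foldl_cons]
    rw [max_eq_left (le_trans (h x (List.mem_cons_self)) hm)]
    exact ih m (fun i hi => h i (List.mem_cons_of_mem _ hi)) hm

-- A's second loop on a sorted nonempty list computes last − head
theorem pvLoopA (S : List Int) (hne : S ≠ []) (hp : S.Pairwise (· ≤ ·)) :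
    (PySem.List.pyRange 0 (S.length : Int) 1).foldl
      (fun m i => max m (PySem.List.pyGetD S (i - 1) 0 - PySem.List.pyGetD S i 0)) 0
    = S.getLast hne - S.head hne := by
  have hlen : 0 < S.length := List.length_pos_iff.2 hne
  have hL : (0 : Int) < (S.length : Int) := by exact_mod_cast hlen
  have hhl : S.head hne ≤ S.getLast hne := by
    rw [List.head_eq_getElem, List.getLast_eq_getElem]
    rcases Nat.eq_or_lt_of_le (Nat.zero_le (S.length - 1)) with h | h
    · simp [← h]
    · exact (List.pairwise_iff_getElem.1 hp) 0 (S.length - 1) hlen (by omega) h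
  rw [PySem.List.pyRange_one_cons hL, List.foldl_cons]
  have h0 : ((0:Int) - 1) = (-1 : Int) := by norm_num
  rw [h0, PySem.List.pyGetD_neg_one S 0 hne, PySem.List.pyGetD_zero]
  have h1 : S.getD 0 0 = S.head hne := by
    cases S with
    | nil => exact absurd rfl hne
    | cons a t => rfl
  rw [h1, max_eq_right (by omega : (0:Int) ≤ S.getLast hne - S.head hne)]
  apply pvFoldMaxNonpos (fun i => PySem.List.pyGetD S (i - 1) 0 - PySem.List.pyGetD S i 0)
  · intro i hi
    obtain ⟨hi1, hi2⟩ := (PySem.List.mem_pyRange_one).1 hi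
    have e1 : PySem.List.pyGetD S (i - 1) 0 = S[(i - 1).toNat] :=
      PySem.List.pyGetD_eq_getElem S 0 (by omega) (by push_cast; omega)
    have e2 : PySem.List.pyGetD S i 0 = S[i.toNat] :=
      PySem.List.pyGetD_eq_getElem S 0 (by omega) (by push_cast; omega)
    rw [e1, e2]
    have := (List.pairwise_iff_getElem.1 hp) (i - 1).toNat i.toNat (by omega) (by omega) (by omega)
    omega
  · omega

-- head of sorted(L) is a minimum of L
theorem pvSortedMin (L : List Int) (hne' : PySem.List.sorted L (fun x => x) false ≠ []) :
    (PySem.List.sorted L (fun x => x) false).head hne' ∈ L ∧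
    ∀ y ∈ L, (PySem.List.sorted L (fun x => x) false).head hne' ≤ y := by
  obtain ⟨m, tS, h⟩ := List.exists_cons_of_ne_nil hne'
  have hd : (PySem.List.sorted L (fun x => x) false).head hne' = m := by
    have h1 : (PySem.List.sorted L (fun x => x) false).head? = some m := by rw [h]; rfl
    rw [List.head?_eq_head hne'] at h1
    exact Option.some.inj h1
  rw [hd]
  constructor
  · have hm : m ∈ PySem.List.sorted L (fun x => x) false := by
      rw [h]; exact List.mem_cons_self
    exact (PySem.List.mem_sorted L (fun x => x) false m).1 hm
  · exact PySem.List.key_head_sorted_le L (fun x => x) h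

-- last of sorted(L) is a maximum of L
theorem pvSortedMax (L : List Int) (hne' : PySem.List.sorted L (fun x => x) false ≠ []) :
    (PySem.List.sorted L (fun x => x) false).getLast hne' ∈ L ∧
    ∀ y ∈ L, y ≤ (PySem.List.sorted L (fun x => x) false).getLast hne' := by
  have hp : (PySem.List.sorted L (fun x => x) false).Pairwise (· ≤ ·) :=
    PySem.List.sorted_pairwise L (fun x => x)
  constructor
  · exact (PySem.List.mem_sorted L (fun x => x) false _).1 (List.getLast_mem hne')
  · intro y hy
    have hy' : y ∈ PySem.List.sorted L (fun x => x) false :=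
      (PySem.List.mem_sorted L (fun x => x) false y).2 hy
    obtain ⟨j, hj, rfl⟩ := List.getElem_of_mem hy'
    rw [List.getLast_eq_getElem]
    rcases Nat.eq_or_lt_of_le (Nat.le_sub_one_of_lt hj) with h | h
    · simp [h]
    · exact (List.pairwise_iff_getElem.1 hp) j _ hj (by omega) h

-- A's unsorted angle list
def pvP (n : Nat) (A : List Int) : List Int :=
  (List.range n).map (fun k => PySem.Int.mod (A.take (k + 1)).sum 360)

theorem pvPne (n : Nat) (A : List Int) (h : 1 ≤ n) : pvP n A ≠ [] := by
  rw [pvP]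
  simp only [ne_eq, List.map_eq_nil_iff, List.range_eq_nil]
  omega

theorem pvSne (n : Nat) (A : List Int) (h : 1 ≤ n) :
    PySem.List.sorted (pvP n A) (fun x => x) false ≠ [] := by
  rw [ne_eq, PySem.List.sorted_eq_nil_iff]
  exact pvPne n A h

theorem pvMods_ne_nil (s : Int) (l : List Int) (h : l ≠ []) : pvMods s l ≠ [] := by
  cases l with
  | nil => exact absurd rfl h
  | cons x t => simp [pvMods]

-- ===== VERDICT (by name: the statement is the Claim_ definition above) =====
theorem findMaxAngle_spec : Claim_equal_findMaxAngle := by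
  intro N A _
  show findMaxAngle N A = findMaxAngle_alt N A
  by_cases hN : N ≤ 0
  · have hr : PySem.List.pyRange 0 N 1 = [] := PySem.List.pyRange_one_eq_nil hN
    simp [findMaxAngle, findMaxAngle_alt, hr, if_pos hN]
  · push_neg at hN
    have hNn : ((N.toNat : Int)) = N := Int.toNat_of_nonneg (le_of_lt hN)
    set n := N.toNat with hn
    have hn1 : 1 ≤ n := by omega
    have hSne := pvSne n A hn1
    have hangles : (PySem.List.pyRange 0 N 1).foldl
        (fun acc i => acc ++ [PySem.Int.mod (PySem.List.slice A none (some (i + 1))).sum 360]) []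
        = pvP n A := by
      rw [pvP, ← hNn, PySem.List.pyRange_zero_nat, PySem.List.foldl_append_singleton_eq_map,
        List.nil_append, List.map_map]
      apply List.map_congr_left
      intro k _
      simp only [Function.comp]
      rw [(by norm_cast : ((k : Int) + 1) = ((k + 1 : Nat) : Int)), PySem.List.slice_to_natCast]
    have hSlen : (PySem.List.sorted (pvP n A) (fun x => x) false).length = n := by
      rw [PySem.List.length_sorted, pvP, List.length_map, List.length_range]
    have hAval : findMaxAngle N A
        = 360 - ((PySem.List.sorted (pvP n A) (fun x => x) false).getLast hSne
                 - (PySem.List.sorted (pvP n A) (fun x => x) false).head hSne) := by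
      show 360 - _ = _
      rw [hangles]
      rw [show N = (((PySem.List.sorted (pvP n A) (fun x => x) false).length : Nat) : Int) from by
        rw [hSlen]; exact hNn.symm]
      rw [pvLoopA _ hSne (PySem.List.sorted_pairwise (pvP n A) (fun x => x))]
    by_cases hA : A = []
    · -- empty list: every prefix sum is 0, both sides give 360
      subst hA
      have hP0 : pvP n ([] : List Int) = List.replicate n 0 := by
        rw [pvP]
        have hz : ∀ k : Nat, PySem.Int.mod ((List.take (k + 1) ([] : List Int)).sum) 360 = 0 := by
          intro k; simp [PySem.Int.mod]
        simp only [List.take_nil, List.sum_nil]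
        simp only [show PySem.Int.mod 0 360 = 0 from rfl]
        rw [List.map_const', List.length_range]
      have hSrep : PySem.List.sorted (pvP n ([] : List Int)) (fun x => x) false
          = List.replicate n 0 := by
        rw [hP0]
        exact PySem.List.sorted_eq_self_of_pairwise _ _ (by
          exact List.pairwise_replicate.2 (Or.inr (le_refl 0)))
      have hBval : findMaxAngle_alt N ([] : List Int) = 360 := by
        show (if N ≤ 0 then (360 : Int) else _) = 360
        rw [if_neg (not_le.2 hN), PySem.List.slice_to _ (le_of_lt hN)]
        norm_num
      rw [hAval, hBval]
      have h1 : (PySem.List.sorted (pvP n ([] : List Int)) (fun x => x) false).getLast hSne = 0 := by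
        have e : (PySem.List.sorted (pvP n ([] : List Int)) (fun x => x) false).getLast? = some 0 := by
          rw [hSrep, List.getLast?_replicate]
          simp; omega
        rw [List.getLast?_eq_getLast hSne] at e
        exact Option.some.inj e
      have h2 : (PySem.List.sorted (pvP n ([] : List Int)) (fun x => x) false).head hSne = 0 := by
        have e : (PySem.List.sorted (pvP n ([] : List Int)) (fun x => x) false).head? = some 0 := by
          rw [hSrep, List.head?_replicate]
          simp; omega
        rw [List.head?_eq_head hSne] at e
        exact Option.some.inj e
      rw [h1, h2]
      norm_num
    · -- main case: N ≥ 1 and A nonempty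
      have hxne : A.take n ≠ [] := by
        rw [ne_eq, List.take_eq_nil_iff]
        push_neg
        exact ⟨by omega, hA⟩
      have hxlen : (A.take n).length = min n A.length := List.length_take
      have hMP : ∀ y ∈ pvMods 0 (A.take n), y ∈ pvP n A := by
        intro y hy
        rw [pvMods_eq_map] at hy
        obtain ⟨k, hk, rfl⟩ := List.mem_map.1 hy
        have hk' : k < (A.take n).length := List.mem_range.1 hk
        rw [List.length_take] at hk'
        rw [pvP]
        apply List.mem_map.2
        refine ⟨k, List.mem_range.2 (by omega), ?_⟩
        rw [zero_add, List.take_take, (by omega : min (k + 1) n = k + 1)]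
      have hPM : ∀ y ∈ pvP n A, y ∈ pvMods 0 (A.take n) := by
        intro y hy
        rw [pvP] at hy
        obtain ⟨k, hk, rfl⟩ := List.mem_map.1 hy
        have hk' : k < n := List.mem_range.1 hk
        by_cases hkx : k < min n A.length
        · rw [pvMods_eq_map]
          apply List.mem_map.2
          refine ⟨k, List.mem_range.2 (by rw [List.length_take]; omega), ?_⟩
          rw [zero_add, List.take_take, (by omega : min (k + 1) n = k + 1)]
        · have hlk : A.length ≤ k := by omega
          have hxA : A.take n = A := List.take_of_length_le (by omega)
          have hAk : A.take (k + 1) = A := List.take_of_length_le (by omega)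
          rw [hAk]
          have hm := pvMods_sum_mem 0 (A.take n) hxne
          rw [zero_add, hxA] at hm
          rw [hxA]
          exact hm
      have hslice : PySem.List.slice A none (some N) = A.take n :=
        PySem.List.slice_to A (le_of_lt hN)
      have hBval : findMaxAngle_alt N A
          = if (pvMods 0 (A.take n)).foldl max (-1) < 0 then 360
            else 360 - ((pvMods 0 (A.take n)).foldl max (-1) - (pvMods 0 (A.take n)).foldl min 360) := by
        show (if N ≤ 0 then (360 : Int) else _) = _
        rw [if_neg (not_le.2 hN), hslice, pvFoldB (A.take n) 0 360 (-1)]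
      obtain ⟨a, t, hMeq⟩ := List.exists_cons_of_ne_nil (pvMods_ne_nil 0 (A.take n) hxne)
      have ha : 0 ≤ a ∧ a < 360 :=
        pvMods_bounds 0 (A.take n) a (by rw [hMeq]; exact List.mem_cons_self)
      have hlo : (pvMods 0 (A.take n)).foldl min 360 = t.foldl min a := by
        rw [hMeq, List.foldl_cons, min_eq_right (by omega : a ≤ (360:Int))]
      have hhi : (pvMods 0 (A.take n)).foldl max (-1) = t.foldl max a := by
        rw [hMeq, List.foldl_cons, max_eq_right (by omega : (-1:Int) ≤ a)]
      have hhi0 : 0 ≤ t.foldl max a := le_trans ha.1 (PySem.List.le_foldl_max t a).1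
      have hlomem : t.foldl min a ∈ pvMods 0 (A.take n) := by
        rw [hMeq]
        rcases PySem.List.foldl_min_mem t a with h | h
        · rw [h]; exact List.mem_cons_self
        · exact List.mem_cons_of_mem _ h
      have hlolb : ∀ y ∈ pvMods 0 (A.take n), t.foldl min a ≤ y := by
        intro y hy
        rw [hMeq] at hy
        rcases List.mem_cons.1 hy with h | h
        · rw [h]; exact (PySem.List.foldl_min_le t a).1
        · exact (PySem.List.foldl_min_le t a).2 y h
      have hhimem : t.foldl max a ∈ pvMods 0 (A.take n) := by
        rw [hMeq]
        rcases PySem.List.foldl_max_mem t a with h | h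
        · rw [h]; exact List.mem_cons_self
        · exact List.mem_cons_of_mem _ h
      have hhiub : ∀ y ∈ pvMods 0 (A.take n), y ≤ t.foldl max a := by
        intro y hy
        rw [hMeq] at hy
        rcases List.mem_cons.1 hy with h | h
        · rw [h]; exact (PySem.List.le_foldl_max t a).1
        · exact (PySem.List.le_foldl_max t a).2 y h
      have hmin := pvSortedMin (pvP n A) hSne
      have hmax := pvSortedMax (pvP n A) hSne
      have hheq : (PySem.List.sorted (pvP n A) (fun x => x) false).head hSne = t.foldl min a :=
        le_antisymm (hmin.2 _ (hMP _ hlomem)) (hlolb _ (hPM _ hmin.1))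
      have hleq : (PySem.List.sorted (pvP n A) (fun x => x) false).getLast hSne = t.foldl max a :=
        le_antisymm (hhiub _ (hPM _ hmax.1)) (hmax.2 _ (hMP _ hhimem))
      rw [hAval, hBval, hlo, hhi, if_neg (by omega), hheq, hleq]
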